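-- pv_equiv track=rewrite | github.com/TanayPratapSingh/the-perfect-lap | code/team_omega_rf_app.py | smart_circuit_search
-- ===== SOURCE A (Python) =====
-- def smart_circuit_search(user_input, circuit_data):
--     """Smart matching for circuit names"""
--     if not user_input:
--         return []
--
--     user_input = user_input.lower().strip()
--     matches = []
--
--     for circuit_name, info in circuit_data.items():
--         # Direct name match
--         if user_input in circuit_name.lower():
--             matches.append((circuit_name, 'exact'))
--             continue
--
--         # Alias match
--         for alias in info.get('aliases', []):
--             if user_input in alias.lower():
--                 matches.append((circuit_name, 'alias'))
--                 break
--
--     # Sort by match type (exact first, then aliases)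
--     matches.sort(key=lambda x: (x[1] != 'exact', x[0]))
--     return [match[0] for match in matches]
-- ===== SOURCE B (Python) =====
-- def smart_circuit_search(user_input, circuit_data):
--     """Sort the circuit entries alphabetically first, then make two filtering
--     passes over the sorted entries: names containing the query, then names
--     whose alias (but not the name itself) contains the query."""
--     if not user_input:
--         return []
--
--     q = user_input.lower().strip()
--     entries = sorted(circuit_data.items(), key=lambda kv: kv[0])
--
--     exact = [name for name, _ in entries if q in name.lower()]
--     alias = [name for name, info in entries
--              if q not in name.lower()
--              and any(q in a.lower() for a in info.get('aliases', []))]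
--     return exact + alias
-- ===== Notes on version B (the rewrite author's own statement) =====
-- stated objective: alternative
-- what changed: Instead of scanning in dict order, tagging matches and doing one composite-key (tag, name) sort at the end, B sorts the whole entry list alphabetically by name up front and then makes two staged filtering passes over the pre-sorted entries (name matches, then alias-only matches), concatenating the results; no tags and no post-sort exist.
import Mathlib
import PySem

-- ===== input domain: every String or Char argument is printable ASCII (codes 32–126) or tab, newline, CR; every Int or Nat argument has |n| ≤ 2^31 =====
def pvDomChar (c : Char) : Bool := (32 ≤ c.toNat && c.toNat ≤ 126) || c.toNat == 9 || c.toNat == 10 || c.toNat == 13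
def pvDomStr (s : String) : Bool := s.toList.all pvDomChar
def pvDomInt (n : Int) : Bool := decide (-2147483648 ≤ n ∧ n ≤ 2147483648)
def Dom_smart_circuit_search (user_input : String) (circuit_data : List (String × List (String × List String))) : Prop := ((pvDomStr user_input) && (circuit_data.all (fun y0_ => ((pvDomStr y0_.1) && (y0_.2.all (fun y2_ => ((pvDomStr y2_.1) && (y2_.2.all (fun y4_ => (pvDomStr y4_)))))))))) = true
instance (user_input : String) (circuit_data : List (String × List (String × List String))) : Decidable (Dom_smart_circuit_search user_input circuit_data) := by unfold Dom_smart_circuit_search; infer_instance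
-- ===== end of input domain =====

-- B sorts the entry list alphabetically by name up front and then makes two staged
-- filtering passes over the pre-sorted entries (name matches, then alias-only matches),
-- instead of A's tag-the-matches scan followed by a composite-key (tag, name) sort.

-- ===== PORT A =====
-- inner 'for alias in info.get("aliases", [])' loop with its break
def pvAliasLoopA (ui name : String) (aliases : List String) (ms : List (String × String)) : List (String × String) :=
  match aliases with
  | [] => ms
  | a :: rest =>
    if PySem.Str.isIn ui (PySem.Str.lower a) then ms ++ [(name, "alias")]
    else pvAliasLoopA ui name rest ms

def smart_circuit_search (user_input : String) (circuit_data : List (String × List (String × List String))) : List String :=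
  if user_input = "" then []
  else
    let ui := PySem.Str.strip (PySem.Str.lower user_input)
    let ms := circuit_data.foldl (fun ms p =>
      if PySem.Str.isIn ui (PySem.Str.lower p.1) then ms ++ [(p.1, "exact")]
      else pvAliasLoopA ui p.1 ((PySem.Dict.mk p.2).getD "aliases" []) ms) []
    (PySem.List.sorted2 ms (fun x => decide (x.2 ≠ "exact")) (fun x => x.1) false).map (fun m => m.1)

-- ===== PORT B =====
-- the two comprehension conditions of Source B
def pvNameHit (q : String) (p : String × List (String × List String)) : Bool :=
  PySem.Str.isIn q (PySem.Str.lower p.1)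
def pvAliasOnlyHit (q : String) (p : String × List (String × List String)) : Bool :=
  !PySem.Str.isIn q (PySem.Str.lower p.1)
    && ((PySem.Dict.mk p.2).getD "aliases" []).any (fun a => PySem.Str.isIn q (PySem.Str.lower a))

def smart_circuit_search_alt (user_input : String) (circuit_data : List (String × List (String × List String))) : List String :=
  if user_input = "" then []
  else
    let q := PySem.Str.strip (PySem.Str.lower user_input)
    let entries := PySem.List.sorted circuit_data (fun kv => kv.1) false
    (entries.filter (pvNameHit q)).map (fun p => p.1)
      ++ (entries.filter (pvAliasOnlyHit q)).map (fun p => p.1)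

-- ===== PRECONDITION & SPEC =====
def Spec_smart_circuit_search (user_input : String) (circuit_data : List (String × List (String × List String))) (out : List String) : Prop := out = smart_circuit_search_alt user_input circuit_data
instance (user_input : String) (circuit_data : List (String × List (String × List String))) (out : List String) : Decidable (Spec_smart_circuit_search user_input circuit_data out) := by unfold Spec_smart_circuit_search; infer_instance

-- ===== CLAIM (what is proved, stated in full; the proofs are below) =====
def Claim_equal_smart_circuit_search : Prop := ∀ (user_input : String) (circuit_data : List (String × List (String × List String))), Dom_smart_circuit_search user_input circuit_data → Spec_smart_circuit_search user_input circuit_data (smart_circuit_search user_input circuit_data)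

-- ===== LEMMAS AND PROOFS =====

-- the tag flag and the two comparison predicates appearing in A's sort
def pvTg (x : String × String) : Bool := decide (x.2 ≠ "exact")
def pvLtA (a b : String × String) : Bool := decide (pvTg a < pvTg b) || (!decide (pvTg b < pvTg a) && decide (a.1 < b.1))
def pvLtS (a b : String × String) : Bool := decide (a.1 < b.1)

theorem pv_ltA_ff (x y : String × String) (hx : pvTg x = false) (hy : pvTg y = false) : pvLtA x y = pvLtS x y := by
  simp [pvLtA, pvLtS, hx, hy]
theorem pv_ltA_tt (x y : String × String) (hx : pvTg x = true) (hy : pvTg y = true) : pvLtA x y = pvLtS x y := by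
  simp [pvLtA, pvLtS, hx, hy]
theorem pv_ltA_ft (x y : String × String) (hx : pvTg x = false) (hy : pvTg y = true) : pvLtA x y = true := by
  simp [pvLtA, hx, hy]
theorem pv_ltA_tf (x y : String × String) (hx : pvTg x = true) (hy : pvTg y = false) : pvLtA x y = false := by
  simp [pvLtA, hx, hy]

theorem pv_insertBy_all_before {A : Type} (bf : A -> A -> Bool) (x : A) (E L : List A)
    (h : ∀ y ∈ L, bf x y = true) : PySem.List.insertBy bf x (E ++ L) = PySem.List.insertBy bf x E ++ L := by
  induction E with
  | nil =>
    cases L with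
    | nil => rfl
    | cons y ys => simp [PySem.List.insertBy, h y (by simp)]
  | cons e E ih =>
    by_cases hb : bf x e = true
    · simp [PySem.List.insertBy, hb]
    · simp [PySem.List.insertBy, hb, ih]

theorem pv_insertBy_all_not {A : Type} (bf : A -> A -> Bool) (x : A) (E L : List A)
    (h : ∀ y ∈ E, bf x y = false) : PySem.List.insertBy bf x (E ++ L) = E ++ PySem.List.insertBy bf x L := by
  induction E with
  | nil => rfl
  | cons e E ih =>
    have he := h e (by simp)
    simp only [List.cons_append, PySem.List.insertBy, he]
    simp only [Bool.false_eq_true, if_false]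
    rw [ih (fun y hy => h y (by simp [hy]))]

theorem pv_insertBy_congr {A : Type} (bf bf' : A -> A -> Bool) (x : A) (ys : List A)
    (h : ∀ y ∈ ys, bf x y = bf' x y) : PySem.List.insertBy bf x ys = PySem.List.insertBy bf' x ys := by
  induction ys with
  | nil => rfl
  | cons y ys ih =>
    simp only [PySem.List.insertBy, h y (by simp)]
    by_cases hb : bf' x y = true
    · simp [hb]
    · simp only [hb, Bool.false_eq_true, if_false]
      rw [ih (fun z hz => h z (by simp [hz]))]

theorem pv_partition_foldl :
    ∀ (ms E L : List (String × String)), (∀ y ∈ E, pvTg y = false) → (∀ y ∈ L, pvTg y = true) →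
      ms.foldl (fun acc x => PySem.List.insertBy pvLtA x acc) (E ++ L)
        = (ms.filter (fun x => !pvTg x)).foldl (fun acc x => PySem.List.insertBy pvLtS x acc) E
          ++ (ms.filter pvTg).foldl (fun acc x => PySem.List.insertBy pvLtS x acc) L := by
  intro ms
  induction ms with
  | nil => intro E L _ _; rfl
  | cons x ms ih =>
    intro E L hE hL
    by_cases hx : pvTg x = true
    · have h1 : PySem.List.insertBy pvLtA x (E ++ L) = E ++ PySem.List.insertBy pvLtA x L :=
        pv_insertBy_all_not _ _ _ _ (fun y hy => pv_ltA_tf x y hx (hE y hy))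
      have h2 : PySem.List.insertBy pvLtA x L = PySem.List.insertBy pvLtS x L :=
        pv_insertBy_congr _ _ _ _ (fun y hy => pv_ltA_tt x y hx (hL y hy))
      have hL' : ∀ y ∈ PySem.List.insertBy pvLtS x L, pvTg y = true := by
        intro y hy
        rcases (PySem.List.mem_insertBy _ _ _ _).1 hy with rfl | hy
        · exact hx
        · exact hL y hy
      simp only [List.foldl_cons, List.filter_cons, hx]
      simp only [Bool.not_true, Bool.false_eq_true, if_false, if_true]
      rw [h1, h2, ih E _ hE hL']
      simp only [List.foldl_cons]
    · have hx' : pvTg x = false := by simpa using hx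
      have h1 : PySem.List.insertBy pvLtA x (E ++ L) = PySem.List.insertBy pvLtA x E ++ L :=
        pv_insertBy_all_before _ _ _ _ (fun y hy => pv_ltA_ft x y hx' (hL y hy))
      have h2 : PySem.List.insertBy pvLtA x E = PySem.List.insertBy pvLtS x E :=
        pv_insertBy_congr _ _ _ _ (fun y hy => pv_ltA_ff x y hx' (hE y hy))
      have hE' : ∀ y ∈ PySem.List.insertBy pvLtS x E, pvTg y = false := by
        intro y hy
        rcases (PySem.List.mem_insertBy _ _ _ _).1 hy with rfl | hy
        · exact hx'
        · exact hE y hy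
      simp only [List.foldl_cons, List.filter_cons, hx']
      simp only [Bool.not_false, if_true, Bool.false_eq_true, if_false]
      rw [h1, h2, ih _ L hE' hL]
      simp only [List.foldl_cons]

-- the inner alias loop appends at most one tagged pair
theorem pv_aliasLoop_eq (ui name : String) (aliases : List String) (ms : List (String × String)) :
    pvAliasLoopA ui name aliases ms
      = ms ++ (if aliases.any (fun a => PySem.Str.isIn ui (PySem.Str.lower a)) then [(name, "alias")] else []) := by
  induction aliases with
  | nil => simp [pvAliasLoopA]
  | cons a rest ih =>
    simp only [pvAliasLoopA]
    simp_all
    by_cases hm : PySem.Chars.isIn ui.toList (PySem.Chars.lower a.toList) = true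
    · simp [hm]
    · simp [hm]

theorem pv_tg_exact (n : String) : pvTg (n, "exact") = false := rfl
theorem pv_tg_alias (n : String) : pvTg (n, "alias") = true := rfl

-- per-entry contribution of A's scan
def pvGA (ui : String) (p : String × List (String × List String)) : List (String × String) :=
  if pvNameHit ui p then [(p.1, "exact")]
  else if pvAliasOnlyHit ui p then [(p.1, "alias")]
  else []

theorem pv_Afold (ui : String) :
    ∀ (cd : List (String × List (String × List String))) (ms : List (String × String)),
      cd.foldl (fun ms p =>
          if PySem.Str.isIn ui (PySem.Str.lower p.1) then ms ++ [(p.1, "exact")]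
          else pvAliasLoopA ui p.1 ((PySem.Dict.mk p.2).getD "aliases" []) ms) ms
        = ms ++ cd.flatMap (pvGA ui) := by
  intro cd
  induction cd with
  | nil => intro ms; simp
  | cons p cd ih =>
    intro ms
    simp only [List.foldl_cons, List.flatMap_cons]
    by_cases hm : PySem.Str.isIn ui (PySem.Str.lower p.1) = true
    · rw [ih]; clear ih; simp only [pvGA, pvNameHit]; simp_all
    · simp only [Bool.not_eq_true] at hm
      rw [pv_aliasLoop_eq, ih]
      by_cases ha : ((PySem.Dict.mk p.2).getD "aliases" []).any (fun a => PySem.Str.isIn ui (PySem.Str.lower a)) = true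
      · clear ih; simp only [pvGA, pvNameHit, pvAliasOnlyHit]; simp_all
      · simp only [Bool.not_eq_true] at ha
        clear ih; simp only [pvGA, pvNameHit, pvAliasOnlyHit]; simp_all

theorem pv_filter_exact (ui : String) (cd : List (String × List (String × List String))) :
    ((cd.flatMap (pvGA ui)).filter (fun x => !pvTg x)).map (fun m => m.1)
      = (cd.filter (pvNameHit ui)).map (fun p => p.1) := by
  induction cd with
  | nil => rfl
  | cons p cd ih =>
    simp only [List.flatMap_cons, List.filter_append, List.map_append, List.filter_cons, ih]
    by_cases h1 : pvNameHit ui p = true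
    · simp [pvGA, h1, pv_tg_exact]
    · simp only [Bool.not_eq_true] at h1
      by_cases h2 : pvAliasOnlyHit ui p = true
      · simp [pvGA, h1, h2, pv_tg_alias]
      · simp only [Bool.not_eq_true] at h2
        simp [pvGA, h1, h2]

theorem pv_filter_alias (ui : String) (cd : List (String × List (String × List String))) :
    ((cd.flatMap (pvGA ui)).filter pvTg).map (fun m => m.1)
      = (cd.filter (pvAliasOnlyHit ui)).map (fun p => p.1) := by
  induction cd with
  | nil => rfl
  | cons p cd ih =>
    simp only [List.flatMap_cons, List.filter_append, List.map_append, List.filter_cons, ih]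
    by_cases h1 : pvNameHit ui p = true
    · have h2 : pvAliasOnlyHit ui p = false := by simp [pvAliasOnlyHit, pvNameHit] at h1 ⊢; simp [h1]
      simp [pvGA, h1, h2, pv_tg_exact]
    · simp only [Bool.not_eq_true] at h1
      by_cases h2 : pvAliasOnlyHit ui p = true
      · simp [pvGA, h1, h2, pv_tg_alias]
      · simp only [Bool.not_eq_true] at h2
        simp [pvGA, h1, h2]

-- A's sorted2 call is the foldl of insertBy with pvLtA (definitional unfolding)
theorem pv_sorted2_unfold (ms : List (String × String)) :
    PySem.List.sorted2 ms (fun x => decide (x.2 ≠ "exact")) (fun x => x.1) false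
      = ms.foldl (fun acc x => PySem.List.insertBy pvLtA x acc) [] := rfl

-- sorting pairs by first component, then projecting, is sorting the projections
theorem pv_map_insertBy {A B : Type} (f : A -> B) (bf : A -> A -> Bool) (bf' : B -> B -> Bool) (x : A) (ys : List A)
    (h : ∀ a b : A, bf a b = bf' (f a) (f b)) :
    (PySem.List.insertBy bf x ys).map f = PySem.List.insertBy bf' (f x) (ys.map f) := by
  induction ys with
  | nil => rfl
  | cons y ys ih =>
    simp only [PySem.List.insertBy, List.map_cons, h x y]
    by_cases hb : bf' (f x) (f y) = true
    · simp [hb]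
    · simp [hb, ih]

theorem pv_map_foldl_insertBy {A B : Type} (f : A -> B) (bf : A -> A -> Bool) (bf' : B -> B -> Bool)
    (h : ∀ a b : A, bf a b = bf' (f a) (f b)) :
    ∀ (ps : List A) (acc : List A),
      (ps.foldl (fun acc x => PySem.List.insertBy bf x acc) acc).map f
        = (ps.map f).foldl (fun a x => PySem.List.insertBy bf' x a) (acc.map f) := by
  intro ps
  induction ps with
  | nil => intro acc; rfl
  | cons p ps ih =>
    intro acc
    simp only [List.foldl_cons, List.map_cons]
    rw [ih, pv_map_insertBy f bf bf' p acc h]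

theorem pv_map_fst_sort (ps : List (String × String)) :
    ((ps.foldl (fun acc x => PySem.List.insertBy pvLtS x acc) []).map (fun m => m.1))
      = PySem.List.sorted (ps.map (fun m => m.1)) (fun x => x) false := by
  rw [PySem.List.sorted_eq_foldl_insertBy]
  exact pv_map_foldl_insertBy (fun m => m.1) pvLtS (fun a b => decide (a < b)) (fun a b => rfl) ps []

-- B's shape: filtering the name-sorted entries and projecting names IS the sorted list
-- of the names of the filtered entries (sorted of a permutation of an already-≤-ordered list)
theorem pv_filter_sorted_proj (cd : List (String × List (String × List String)))
    (p : String × List (String × List String) -> Bool) :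
    PySem.List.sorted ((cd.filter p).map (fun x => x.1)) (fun x => x) false
      = ((PySem.List.sorted cd (fun kv => kv.1) false).filter p).map (fun x => x.1) := by
  apply PySem.List.sorted_id_eq_of_perm_of_pairwise
  · exact ((PySem.List.sorted_perm cd (fun kv => kv.1) false).filter p).map _
  · have hpw : (PySem.List.sorted cd (fun kv => kv.1) false).Pairwise (fun a b => a.1 ≤ b.1) :=
      PySem.List.sorted_pairwise cd (fun kv => kv.1)
    have hsub : ((PySem.List.sorted cd (fun kv => kv.1) false).filter p).Pairwise (fun a b => a.1 ≤ b.1) :=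
      hpw.sublist (List.filter_sublist)
    exact List.Pairwise.map _ (fun a b h => h) hsub

theorem pv_key (user_input : String) (circuit_data : List (String × List (String × List String))) :
    smart_circuit_search user_input circuit_data = smart_circuit_search_alt user_input circuit_data := by
  unfold smart_circuit_search smart_circuit_search_alt
  by_cases h0 : user_input = ""
  · simp [h0]
  · simp only [h0, if_false]
    rw [pv_Afold, pv_sorted2_unfold]
    rw [show ([] : List (String × String)) = [] ++ [] from rfl] at *
    rw [pv_partition_foldl _ [] [] (by simp) (by simp)]
    simp only [List.nil_append, List.map_append]
    rw [pv_map_fst_sort, pv_map_fst_sort, pv_filter_exact, pv_filter_alias,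
        pv_filter_sorted_proj, pv_filter_sorted_proj]

-- ===== VERDICT (by name: the statement is the Claim_ definition above) =====
theorem smart_circuit_search_spec : Claim_equal_smart_circuit_search := by
  intro user_input circuit_data _
  unfold Spec_smart_circuit_search
  exact pv_key user_input circuit_data
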